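-- pv_equiv track=rewrite | github.com/pietro-foini/ISI-WFP | Time-series Forecasting/Evaluation_test.py | recursive_improvement
-- ===== SOURCE A (Python) =====
-- def recursive_improvement(x):
--     list_improvements = list()
--
--     for i,value in enumerate(x):
--         if i == 0:
--             best_min = value
--         else:
--             if best_min > value:
--                 diff = best_min - value
--                 best_min = value
--                 list_improvements.append(diff)
--             else:
--                 list_improvements.append(0)
--
--     return list_improvements
-- ===== SOURCE B (Python) =====
-- def recursive_improvement(x):
--     # Pass 1: prefix-minimum table. Pass 2: the answer is simply the adjacent
--     # differences of that table (every drop of the running minimum IS the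
--     # improvement, and where it does not drop the difference is 0), so the
--     # second pass needs no max, no branch and never looks at x again.
--     mins = []
--     for v in x:
--         mins.append(v if not mins else min(mins[-1], v))
--     return [p - q for p, q in zip(mins, mins[1:])]
-- ===== Notes on version B (the rewrite author's own statement) =====
-- stated objective: alternative
-- what changed: Replaces the stateful best_min loop with branching appends by a prefix-minimum table built first, whose adjacent differences (mins[i-1]-mins[i]) are returned directly - no max, no comparison with x in the output pass.
import Mathlib
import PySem

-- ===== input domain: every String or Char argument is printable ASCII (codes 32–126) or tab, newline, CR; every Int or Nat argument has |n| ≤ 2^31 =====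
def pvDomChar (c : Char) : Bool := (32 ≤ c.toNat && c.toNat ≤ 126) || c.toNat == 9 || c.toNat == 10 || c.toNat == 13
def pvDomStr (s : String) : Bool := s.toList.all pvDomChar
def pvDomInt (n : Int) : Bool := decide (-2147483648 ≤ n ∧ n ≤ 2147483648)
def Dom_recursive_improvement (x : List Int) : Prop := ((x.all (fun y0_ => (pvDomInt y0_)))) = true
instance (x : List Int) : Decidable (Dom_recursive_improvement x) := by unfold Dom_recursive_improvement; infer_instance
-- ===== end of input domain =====

-- B builds the prefix-minimum table first and returns its adjacent differences; no max or comparison with x in the output pass (alternative decomposition, same cost).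

-- ===== PORT A =====
-- A's loop: skip i = 0 (initialise best_min), then append best_min - value or 0 while updating best_min.
def recursive_improvement_go (best : Int) : List Int → List Int
  | [] => []
  | v :: t => if best > v then (best - v) :: recursive_improvement_go v t
              else 0 :: recursive_improvement_go best t

def recursive_improvement (x : List Int) : List Int :=
  match x with
  | [] => []
  | h :: t => recursive_improvement_go h t

-- ===== PORT B =====
-- Source B pass 1: mins.append(v if not mins else min(mins[-1], v)) — foldl with a
-- prepend accumulator (head = mins[-1]) then reverse; pass 2: zip of mins with
-- mins[1:], taking plain differences p - q.
def recursive_improvement_alt (x : List Int) : List Int :=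
  let mins := (x.foldl (fun acc v =>
      (match acc with | [] => v | m :: _ => min m v) :: acc) []).reverse
  List.zipWith (fun p q => p - q) mins (mins.drop 1)

-- ===== PRECONDITION & SPEC =====
def Spec_recursive_improvement (x : List Int) (out : List Int) : Prop := out = recursive_improvement_alt x
instance (x : List Int) (out : List Int) : Decidable (Spec_recursive_improvement x out) := by unfold Spec_recursive_improvement; infer_instance

-- ===== CLAIM (what is proved, stated in full; the proofs are below) =====
def Claim_equal_recursive_improvement : Prop := ∀ (x : List Int), Dom_recursive_improvement x → Spec_recursive_improvement x (recursive_improvement x)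

-- ===== LEMMAS AND PROOFS =====
-- proof-only scan of prefix minima (head-first form of B's table)
def pvScanMin (m : Int) : List Int → List Int
  | [] => [m]
  | v :: t => m :: pvScanMin (min m v) t

theorem pvScanMin_head (m : Int) (t : List Int) :
    pvScanMin m t = m :: (pvScanMin m t).drop 1 := by
  cases t <;> rfl

theorem foldl_scanMin (t : List Int) : ∀ (m : Int) (acc : List Int),
    t.foldl (fun acc v =>
      (match acc with | [] => v | m :: _ => min m v) :: acc) (m :: acc)
      = (pvScanMin m t).reverse ++ acc := by
  induction t with
  | nil => intro m acc; simp [pvScanMin]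
  | cons v t ih =>
      intro m acc
      simp only [List.foldl, pvScanMin, List.reverse_cons]
      rw [ih (min m v) (m :: acc)]
      simp

theorem go_eq_diffScan (t : List Int) : ∀ m : Int,
    recursive_improvement_go m t
      = List.zipWith (fun p q => p - q) (pvScanMin m t) ((pvScanMin m t).drop 1) := by
  induction t with
  | nil => intro m; rfl
  | cons v t ih =>
      intro m
      simp only [recursive_improvement_go, pvScanMin, List.drop_succ_cons, List.drop_zero]
      rw [pvScanMin_head (min m v) t]
      simp only [List.zipWith]
      rw [← pvScanMin_head (min m v) t, ← ih (min m v)]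
      by_cases h : m > v
      · rw [if_pos h, min_eq_right (le_of_lt h)]
      · rw [if_neg h, min_eq_left (by omega)]
        norm_num

-- ===== VERDICT (by name: the statement is the Claim_ definition above) =====
theorem recursive_improvement_spec : Claim_equal_recursive_improvement := by
  intro x _
  unfold Spec_recursive_improvement recursive_improvement recursive_improvement_alt
  cases x with
  | nil => rfl
  | cons h t =>
      simp only [List.foldl]
      rw [foldl_scanMin t h [], List.append_nil, List.reverse_reverse]
      exact go_eq_diffScan t h
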